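-- pv_equiv track=rewrite | github.com/xsangyhix/DeepSubmarineAdventure | scripts/pyramid.py | get_pyramid_matrix
-- ===== SOURCE A (Python) =====
-- def get_pyramid_matrix(size):
--     result_matrix = []
--     for row in range(1, size + 1):
--         result_matrix.append([])
--         for item in range(1, row):
--             result_matrix[row - 1].append(item)
--         result_matrix[row - 1].append(row)
--         for item in reversed(range(1, row)):
--             result_matrix[row - 1].append(item)
--
--     return result_matrix
-- ===== SOURCE B (Python) =====
-- def get_pyramid_matrix(size):
--     return [[min(j, 2 * r - j) for j in range(1, 2 * r)]
--             for r in range(1, size + 1)]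
-- ===== Notes on version B (the rewrite author's own statement) =====
-- stated objective: idiomatic
-- what changed: Replaces the two directional appending loops per row (count up, append the peak, count down) with a single closed-form pass emitting min(j, 2r-j) for j in 1..2r-1, assembled as one nested comprehension.
import Mathlib
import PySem

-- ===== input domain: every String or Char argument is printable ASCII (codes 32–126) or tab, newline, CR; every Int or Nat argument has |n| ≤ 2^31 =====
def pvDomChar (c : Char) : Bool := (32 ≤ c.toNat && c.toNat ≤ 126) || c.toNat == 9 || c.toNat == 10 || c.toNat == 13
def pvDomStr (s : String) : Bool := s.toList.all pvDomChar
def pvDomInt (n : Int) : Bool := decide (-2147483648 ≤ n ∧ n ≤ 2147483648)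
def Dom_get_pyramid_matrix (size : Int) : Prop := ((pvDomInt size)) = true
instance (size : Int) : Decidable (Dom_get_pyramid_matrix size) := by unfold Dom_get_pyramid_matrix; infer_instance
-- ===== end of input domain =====

-- B replaces A's two directional per-row loops with one closed-form pass min(j, 2r-j); same cost, more idiomatic.


-- ===== PORT A =====
-- Python lists are dynamic arrays with O(1) append; `.append` is ported as `Array.push`.
def get_pyramid_matrix (size : Int) : List (List Int) :=
  (((PySem.List.pyRange 1 (size + 1) 1).foldl
    (fun result_matrix row =>
      -- result_matrix.append([]); then the three appending phases into result_matrix[row-1]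
      let r1 := (PySem.List.pyRange 1 row 1).foldl (fun acc item => acc.push item) (#[] : Array Int)
      let r2 := r1.push row
      let r3 := ((PySem.List.pyRange 1 row 1).reverse).foldl (fun acc item => acc.push item) r2
      result_matrix.push r3)
    (#[] : Array (Array Int))).toList).map Array.toList

-- ===== PORT B =====
def get_pyramid_matrix_alt (size : Int) : List (List Int) :=
  (PySem.List.pyRange 1 (size + 1) 1).map
    (fun r => (PySem.List.pyRange 1 (2 * r) 1).map (fun j => min j (2 * r - j)))

-- ===== PRECONDITION & SPEC =====
def Spec_get_pyramid_matrix (size : Int) (out : List (List Int)) : Prop := out = get_pyramid_matrix_alt size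
instance (size : Int) (out : List (List Int)) : Decidable (Spec_get_pyramid_matrix size out) := by unfold Spec_get_pyramid_matrix; infer_instance

-- ===== CLAIM (what is proved, stated in full; the proofs are below) =====
def Claim_equal_get_pyramid_matrix : Prop := ∀ (size : Int), Dom_get_pyramid_matrix size → Spec_get_pyramid_matrix size (get_pyramid_matrix size)

-- ===== LEMMAS AND PROOFS =====

-- pushing each element one by one onto an array is init ++ the list
theorem pv_foldl_push (l : List Int) (init : Array Int) :
    (l.foldl (fun acc item => acc.push item) init).toList = init.toList ++ l := by
  induction l generalizing init with
  | nil => simp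
  | cons x xs ih => simp [List.foldl]

-- pushing one transformed row per element is map
theorem pv_foldl_push_map (g : Int → Array Int) (l : List Int) (init : Array (Array Int)) :
    ((l.foldl (fun acc x => acc.push (g x)) init).toList).map Array.toList
      = (init.toList).map Array.toList ++ l.map (fun x => (g x).toList) := by
  induction l generalizing init with
  | nil => simp
  | cons x xs ih => simp [List.foldl]

-- the closed-form row equals A's up-peak-down row, for r ≥ 1
theorem pv_row_eq (r : Int) (hr : 1 ≤ r) :
    (PySem.List.pyRange 1 (2 * r) 1).map (fun j => min j (2 * r - j))
      = PySem.List.pyRange 1 r 1 ++ [r] ++ (PySem.List.pyRange 1 r 1).reverse := by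
  rw [PySem.List.pyRange_one_append 1 (r + 1) (2 * r) (by omega) (by omega), List.map_append]
  congr 1
  · rw [← PySem.List.pyRange_one_succ_right (by omega : (1:Int) ≤ r)]
    have h := List.map_id (PySem.List.pyRange 1 (r + 1) 1)
    nth_rewrite 2 [← h]
    apply List.map_congr_left
    intro j hj
    rw [PySem.List.mem_pyRange_one] at hj
    simp only [id]
    omega
  · have hrev : (PySem.List.pyRange 1 r 1).reverse = PySem.List.pyRange (r - 1) 0 (-1) := by
      rw [PySem.List.pyRange_neg_one_eq_reverse]
      norm_num
    rw [hrev, PySem.List.pyRange_one, PySem.List.pyRange_neg_one, List.map_map]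
    have hn : (2 * r - (r + 1)).toNat = (r - 1 - 0).toNat := by omega
    rw [hn]
    apply List.map_congr_left
    intro k _
    simp only [Function.comp]
    omega

-- ===== VERDICT (by name: the statement is the Claim_ definition above) =====
theorem get_pyramid_matrix_spec : Claim_equal_get_pyramid_matrix := by
  intro size _
  unfold Spec_get_pyramid_matrix get_pyramid_matrix get_pyramid_matrix_alt
  rw [pv_foldl_push_map
    (fun row => ((PySem.List.pyRange 1 row 1).reverse).foldl (fun acc item => acc.push item)
      (((PySem.List.pyRange 1 row 1).foldl (fun acc item => acc.push item) (#[] : Array Int)).push row))]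
  simp only [List.map_nil, List.nil_append]
  apply List.map_congr_left
  intro r hr
  rw [PySem.List.mem_pyRange_one] at hr
  rw [pv_foldl_push, Array.toList_push, pv_foldl_push]
  exact (pv_row_eq r hr.1).symm
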